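-- pv_equiv track=rewrite | github.com/drci-foch/OCR_EFR | OCR_ScanFOCH/OCRProcessor.py | combine_all_occurrences
-- ===== SOURCE A (Python) =====
-- def combine_all_occurrences(sections, primary, secondary):
--     """Combine all occurrences of two elements into a single string in the sections list."""
--     i = 0
--     while i < len(sections) - 1:  # -1 because we're checking pairs of elements
--         if sections[i] == primary and sections[i + 1] == secondary:
--             sections[i] = primary + " " + secondary
--             sections.pop(i + 1)
--         else:
--             i += 1
--     return sections
-- ===== SOURCE B (Python) =====
-- def combine_all_occurrences(sections, primary, secondary):
--     """Combine all occurrences of two elements into a single string in the sections list."""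
--     merged = primary + " " + secondary
--     result = []
--     j = 0
--     n = len(sections)
--     while j < n:
--         if j + 1 < n and sections[j] == primary and sections[j + 1] == secondary:
--             result.append(merged)
--             j += 2
--         else:
--             result.append(sections[j])
--             j += 1
--     return result
-- ===== Notes on version B (the rewrite author's own statement) =====
-- stated objective: alternative
-- what changed: Replaces A's in-place while loop that merges by sections.pop(i+1) (shifting the tail each time) with a single forward pass building a new result list, consuming two elements on a match and one otherwise; A's in-place mutation of sections is not reproduced (return value equivalence).
import Mathlib
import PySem

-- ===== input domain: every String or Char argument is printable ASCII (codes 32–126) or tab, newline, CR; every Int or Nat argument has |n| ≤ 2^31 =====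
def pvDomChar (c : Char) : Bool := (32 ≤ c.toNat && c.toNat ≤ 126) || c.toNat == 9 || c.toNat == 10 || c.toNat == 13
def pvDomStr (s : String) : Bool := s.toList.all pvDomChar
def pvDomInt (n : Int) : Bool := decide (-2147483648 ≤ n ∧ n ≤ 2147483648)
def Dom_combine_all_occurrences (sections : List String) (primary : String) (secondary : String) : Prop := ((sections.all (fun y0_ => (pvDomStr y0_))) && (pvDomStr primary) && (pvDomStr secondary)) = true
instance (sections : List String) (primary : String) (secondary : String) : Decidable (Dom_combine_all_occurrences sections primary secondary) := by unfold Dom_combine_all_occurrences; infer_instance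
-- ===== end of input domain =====

-- B replaces A's in-place pop-shifting while loop with a single forward pass that builds
-- a fresh result list (a different algorithm; not measurably faster on the timed inputs).
-- Equivalence is about the RETURN value only: Python A mutates `sections` in place, B does not.

-- ===== PORT A =====
-- A's while loop: i stays put after a merge (the list shrank), else i += 1.
def combineA (sections : List String) (i : Nat) (primary secondary : String) : List String :=
  if h : i + 1 < sections.length then
    if sections.getD i "" == primary && sections.getD (i + 1) "" == secondary then
      combineA (((sections.set i (primary ++ " " ++ secondary)).eraseIdx (i + 1))) i primary secondary
    else
      combineA sections (i + 1) primary secondary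
  else
    sections
termination_by sections.length - i
decreasing_by
  · simp [List.length_eraseIdx, List.length_set, h]; omega
  · omega

def combine_all_occurrences (sections : List String) (primary : String) (secondary : String) : List String :=
  combineA sections 0 primary secondary

-- ===== PORT B =====
-- Source B's single forward pass: consume two elements on a match, one otherwise.
def combineB (primary secondary merged : String) : List String → List String
  | [] => []
  | [x] => [x]
  | x :: y :: rest =>
    if x == primary && y == secondary then
      merged :: combineB primary secondary merged rest
    else
      x :: combineB primary secondary merged (y :: rest)

def combine_all_occurrences_alt (sections : List String) (primary : String) (secondary : String) : List String :=
  combineB primary secondary (primary ++ " " ++ secondary) sections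

-- ===== PRECONDITION & SPEC =====
def Spec_combine_all_occurrences (sections : List String) (primary : String) (secondary : String) (out : List String) : Prop := out = combine_all_occurrences_alt sections primary secondary
instance (sections : List String) (primary : String) (secondary : String) (out : List String) : Decidable (Spec_combine_all_occurrences sections primary secondary out) := by unfold Spec_combine_all_occurrences; infer_instance

-- ===== CLAIM (what is proved, stated in full; the proofs are below) =====
def Claim_equal_combine_all_occurrences : Prop := ∀ (sections : List String) (primary : String) (secondary : String), Dom_combine_all_occurrences sections primary secondary → Spec_combine_all_occurrences sections primary secondary (combine_all_occurrences sections primary secondary)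

-- ===== LEMMAS AND PROOFS =====

theorem merged_ne_primary (p q : String) : (p ++ " " ++ q) ≠ p := by
  intro h
  have hl := congrArg String.length h
  simp [String.length_append] at hl
  have h1 : (" " : String).length = 1 := rfl
  omega

theorem getD_append_len {l r : List String} {d : String} (k : Nat) :
    (l ++ r).getD (l.length + k) d = r.getD k d := by
  induction l with
  | nil => simp
  | cons a l ih => simpa [Nat.succ_add] using ih

theorem set_append_len {l r : List String} {x c : String} :
    (l ++ x :: r).set l.length c = l ++ c :: r := by
  induction l with
  | nil => simp
  | cons a l ih => simp [ih]

theorem eraseIdx_append_len {l r : List String} {x : String} :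
    (l ++ x :: r).eraseIdx l.length = l ++ r := by
  induction l with
  | nil => simp
  | cons a l ih => simp [ih]

theorem combineB_cons_ne (p q m x : String) (r : List String) (hx : (x == p) = false) :
    combineB p q m (x :: r) = x :: combineB p q m r := by
  cases r with
  | nil => simp [combineB]
  | cons z r2 => simp [combineB, hx]

theorem combineA_eq (p q : String) :
    ∀ (n : Nat) (rest : List String), rest.length ≤ n → ∀ (pre : List String),
      combineA (pre ++ rest) pre.length p q = pre ++ combineB p q (p ++ " " ++ q) rest := by
  intro n
  induction n with
  | zero =>
    intro rest hlen pre
    have : rest = [] := List.eq_nil_of_length_eq_zero (Nat.le_zero.mp hlen)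
    subst this
    rw [combineA]
    simp [combineB]
  | succ n ih =>
    intro rest hlen pre
    match rest with
    | [] =>
      rw [combineA]; simp [combineB]
    | [x] =>
      rw [combineA]; simp [combineB]
    | x :: y :: r =>
      rw [combineA]
      have hlt : pre.length + 1 < (pre ++ x :: y :: r).length := by simp only [List.length_append, List.length_cons]; omega
      rw [dif_pos hlt]
      have hx : (pre ++ x :: y :: r).getD pre.length "" = x := by
        have h0 := getD_append_len (l := pre) (r := x :: y :: r) (d := "") 0
        rw [Nat.add_zero] at h0
        exact h0
      have hy : (pre ++ x :: y :: r).getD (pre.length + 1) "" = y := by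
        exact getD_append_len (l := pre) (r := x :: y :: r) (d := "") 1
      rw [hx, hy]
      cases hc : (x == p && y == q) with
      | true =>
        rw [if_pos rfl]
        have hset : (pre ++ x :: y :: r).set pre.length (p ++ " " ++ q) =
            pre ++ (p ++ " " ++ q) :: y :: r := set_append_len
        rw [hset]
        have herase : (pre ++ (p ++ " " ++ q) :: y :: r).eraseIdx (pre.length + 1) =
            pre ++ (p ++ " " ++ q) :: r := by
          have := eraseIdx_append_len (l := pre ++ [p ++ " " ++ q]) (r := r) (x := y)
          simpa using this
        rw [herase]
        have hrec := ih ((p ++ " " ++ q) :: r) (by simp only [List.length_cons] at hlen ⊢; omega) pre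
        rw [hrec]
        have hm : ((p ++ " " ++ q) == p) = false := by
          simpa using merged_ne_primary p q
        rw [combineB_cons_ne p q _ _ _ hm]
        simp [combineB, hc]
      | false =>
        rw [if_neg (by simp)]
        have hrec := ih (y :: r) (by simp only [List.length_cons] at hlen ⊢; omega) (pre ++ [x])
        simp only [List.length_append, List.length_cons, List.length_nil] at hrec
        have : pre ++ x :: y :: r = (pre ++ [x]) ++ y :: r := by simp
        rw [this]
        simpa [combineB, hc] using hrec

theorem combine_all_occurrences_spec : Claim_equal_combine_all_occurrences := by
  intro sections primary secondary _
  unfold Spec_combine_all_occurrences combine_all_occurrences combine_all_occurrences_alt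
  simpa using combineA_eq primary secondary sections.length sections (le_refl _) []
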